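-- pv_equiv track=rewrite | github.com/ursa-mikail/emotion_tree_visualization | emotion_tree_visualization_with_color_assignment.py | assign_colors
-- ===== SOURCE A (Python) =====
-- def assign_colors(G, clusters):
--     color_map = []
--     for node in G:
--         for cluster, color in clusters.items():
--             if node.startswith(cluster):  # Assuming cluster names are prefixes of node names
--                 color_map.append(color)
--                 break
--         else:
--             color_map.append('grey')  # Default color for nodes not in any cluster
--     return color_map
-- ===== SOURCE B (Python) =====
-- def assign_colors(G, clusters):
--     nodes = list(G)
--     result = [None] * len(nodes)
--     for cluster, color in clusters.items():
--         for i, node in enumerate(nodes):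
--             if result[i] is None and node.startswith(cluster):
--                 result[i] = color
--     return [c if c is not None else 'grey' for c in result]
-- ===== Notes on version B (the rewrite author's own statement) =====
-- stated objective: alternative
-- what changed: Inverted the loop nesting to cluster-major: B fills a parallel result array over one pass per cluster, assigning only still-unassigned nodes, instead of A's node-major inner scan with break/else; dict order plus assign-once reproduces A's first-match tie-break.
import Mathlib
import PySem

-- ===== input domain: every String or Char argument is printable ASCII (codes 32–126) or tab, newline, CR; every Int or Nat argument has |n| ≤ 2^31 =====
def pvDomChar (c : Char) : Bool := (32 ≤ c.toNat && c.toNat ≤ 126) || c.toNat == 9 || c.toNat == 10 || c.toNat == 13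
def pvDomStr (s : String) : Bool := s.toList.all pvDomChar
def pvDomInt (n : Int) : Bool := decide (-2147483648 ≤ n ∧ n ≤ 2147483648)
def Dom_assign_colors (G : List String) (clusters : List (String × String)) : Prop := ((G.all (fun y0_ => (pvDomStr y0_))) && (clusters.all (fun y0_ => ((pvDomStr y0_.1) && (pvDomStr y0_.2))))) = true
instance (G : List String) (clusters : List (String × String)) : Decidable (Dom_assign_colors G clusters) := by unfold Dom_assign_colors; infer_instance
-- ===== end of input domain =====

-- B inverts the loop nesting to cluster-major with an assign-once result array; same cost, alternative structure.

-- ===== PORT A =====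
-- inner 'for cluster, color in clusters.items(): … break / else: append grey'
def pvFirstColor (node : String) : List (String × String) → String
  | [] => "grey"
  | (cluster, color) :: rest =>
      if PySem.Str.startswith node cluster then color else pvFirstColor node rest

def assign_colors (G : List String) (clusters : List (String × String)) : List String :=
  G.foldl (fun color_map node => color_map ++ [pvFirstColor node clusters]) []

-- ===== PORT B =====
-- one cluster pass: 'for i, node in enumerate(nodes): if result[i] is None and node.startswith(cluster)'
def pvClusterPass (result : List (Option String)) (nodes : List String)
    (cluster color : String) : List (Option String) :=
  List.zipWith (fun r node =>
    if r.isNone && PySem.Str.startswith node cluster then some color else r) result nodes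

def assign_colors_alt (G : List String) (clusters : List (String × String)) : List String :=
  let nodes := G
  let result := clusters.foldl (fun result p => pvClusterPass result nodes p.1 p.2)
                  (nodes.map (fun _ => (none : Option String)))
  result.map (fun c => c.getD "grey")

-- ===== PRECONDITION & SPEC =====
def Spec_assign_colors (G : List String) (clusters : List (String × String)) (out : List String) : Prop := out = assign_colors_alt G clusters
instance (G : List String) (clusters : List (String × String)) (out : List String) : Decidable (Spec_assign_colors G clusters out) := by unfold Spec_assign_colors; infer_instance

-- ===== CLAIM (what is proved, stated in full; the proofs are below) =====
def Claim_equal_assign_colors : Prop := ∀ (G : List String) (clusters : List (String × String)), Dom_assign_colors G clusters → Spec_assign_colors G clusters (assign_colors G clusters)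

-- ===== LEMMAS AND PROOFS =====

-- pointwise step of pvClusterPass
def pvStep (node : String) (r : Option String) (p : String × String) : Option String :=
  if r.isNone && PySem.Str.startswith node p.1 then some p.2 else r

theorem pvZipWith_map {α β γ : Type} (f : β → α → γ) (h : α → β) (G : List α) :
    List.zipWith f (G.map h) G = G.map (fun n => f (h n) n) := by
  induction G with
  | nil => rfl
  | cons a t ih => simp [List.zipWith, ih]

-- the cluster-major fold acts pointwise on each node
theorem pvFold_pointwise (clusters : List (String × String)) (G : List String)
    (h : String → Option String) :
    clusters.foldl (fun result p => pvClusterPass result G p.1 p.2) (G.map h)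
      = G.map (fun n => clusters.foldl (pvStep n) (h n)) := by
  induction clusters generalizing h with
  | nil => rfl
  | cons p rest ih =>
      simp only [List.foldl]
      rw [show pvClusterPass (G.map h) G p.1 p.2
            = G.map (fun n => pvStep n (h n) p) from pvZipWith_map _ _ _, ih]

theorem pvStep_some (node : String) (c : String) (clusters : List (String × String)) :
    clusters.foldl (pvStep node) (some c) = some c := by
  induction clusters with
  | nil => rfl
  | cons p rest ih => simp [List.foldl, pvStep, ih]

theorem pvPointwise_eq_first (node : String) (clusters : List (String × String)) :
    (clusters.foldl (pvStep node) none).getD "grey" = pvFirstColor node clusters := by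
  induction clusters with
  | nil => rfl
  | cons p rest ih =>
      simp only [List.foldl]
      by_cases hsw : PySem.Str.startswith node p.1 = true
      · have hp : pvStep node none p = some p.2 := by
          unfold pvStep
          simp only [Option.isNone_none, Bool.true_and, hsw, if_true]
        rw [hp, pvStep_some, pvFirstColor, if_pos hsw]
        rfl
      · have hp : pvStep node none p = none := by
          unfold pvStep
          simp only [Option.isNone_none, Bool.true_and]
          exact if_neg hsw
        rw [hp, pvFirstColor, if_neg hsw, ih]

theorem pvA_eq_map (G : List String) (clusters : List (String × String)) :
    assign_colors G clusters = G.map (fun n => pvFirstColor n clusters) := by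
  unfold assign_colors
  induction G using List.reverseRecOn with
  | nil => rfl
  | append_singleton t a ih => simp [List.foldl_append, ih]

-- ===== VERDICT (by name: the statement is the Claim_ definition above) =====
theorem assign_colors_spec : Claim_equal_assign_colors := by
  intro G clusters _
  unfold Spec_assign_colors
  rw [pvA_eq_map]
  have halt : assign_colors_alt G clusters
      = ((clusters.foldl (fun result p => pvClusterPass result G p.1 p.2)
            (G.map (fun _ => (none : Option String)))).map (fun c => c.getD "grey")) := rfl
  rw [halt, pvFold_pointwise, List.map_map]
  apply List.map_congr_left
  intro n _
  exact (pvPointwise_eq_first n clusters).symm
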